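-- pv_equiv track=rewrite | github.com/Henok-Enyew/Leetcode-Solutions | A2SV Remote Contest #7 17-Mar-2025/C - The Quantum Canyon Conundrum 309567.py | is_true_canyon
-- ===== SOURCE A (Python) =====
-- def is_true_canyon(n, a):
--     segments = []
--     i = 0
--     while i < n:
--         current = a[i]
--         start = i
--         while i < n and a[i] == current:
--             i += 1
--         end = i - 1
--         segments.append((start, end, current))
--
--     valid_segments = []
--     for seg in segments:
--         l, r, val = seg
--         left_cond = (l == 0) or (a[l - 1] > val)
--         right_cond = (r == n - 1) or (a[r + 1] > val)
--         if left_cond and right_cond: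
--             valid_segments.append(seg)
--
--     return len(valid_segments) == 1
-- ===== SOURCE B (Python) =====
-- def is_true_canyon(n, a):
--     if n <= 0:
--         return False
--     valleys = 0
--     descending = True
--     prev = a[0]
--     for x in a[1:n]:
--         if x == prev:
--             continue
--         if x > prev:
--             if descending:
--                 valleys += 1
--             descending = False
--         else:
--             descending = True
--         prev = x
--     if descending:
--         valleys += 1
--     return valleys == 1
-- ===== Notes on version B (the rewrite author's own statement) =====
-- stated objective: simpler
-- what changed: B replaces A's two-phase approach (build an explicit list of (start,end,value) segment triples, then a second filter pass re-indexing the array around each segment) with a single fused pass that tracks the previous distinct value and a descending flag and counts valleys on the fly, never materialising segments; avoiding the intermediate list also makes it measurably faster by a constant factor.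
import Mathlib
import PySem

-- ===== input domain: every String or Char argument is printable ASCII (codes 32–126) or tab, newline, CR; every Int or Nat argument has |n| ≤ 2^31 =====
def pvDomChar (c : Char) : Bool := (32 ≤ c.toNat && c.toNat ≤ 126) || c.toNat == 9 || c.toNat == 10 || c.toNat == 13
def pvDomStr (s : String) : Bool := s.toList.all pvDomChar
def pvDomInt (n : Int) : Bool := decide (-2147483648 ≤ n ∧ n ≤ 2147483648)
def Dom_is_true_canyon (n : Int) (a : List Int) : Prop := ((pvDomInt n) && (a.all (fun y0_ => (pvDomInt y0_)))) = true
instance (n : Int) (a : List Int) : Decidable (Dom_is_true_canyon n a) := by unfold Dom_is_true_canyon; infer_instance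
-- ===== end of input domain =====

-- B replaces A's two-phase segment construction (index triples + a filter pass) with a single
-- fused pass that tracks the previous distinct value and a descending flag (objective: simpler).

-- ===== PORT A =====
-- inner while loop: advances i while i < n and a[i] == current
def segInner (a : List Int) (n cur : Int) : Int → Nat → Int
  | i, 0 => i
  | i, fuel+1 =>
    if i < n ∧ PySem.List.pyGetD a i 0 = cur then segInner a n cur (i+1) fuel else i

-- outer while loop: builds the (start, end, value) segment list
def segOuter (a : List Int) (n : Int) : Int → Nat → List (Int × Int × Int)
  | _, 0 => []
  | i, fuel+1 =>
    if i < n then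
      let cur := PySem.List.pyGetD a i 0
      let j := segInner a n cur i (fuel+1)
      (i, j - 1, cur) :: segOuter a n j fuel
    else []

def is_true_canyon (n : Int) (a : List Int) : Bool :=
  let segments := segOuter a n 0 n.toNat
  let valid := segments.filter (fun s =>
    (decide (s.1 = 0) || decide (PySem.List.pyGetD a (s.1 - 1) 0 > s.2.2)) &&
    (decide (s.2.1 = n - 1) || decide (PySem.List.pyGetD a (s.2.1 + 1) 0 > s.2.2)))
  decide (valid.length = 1)

-- ===== PORT B =====
def bstep (st : Int × Bool × Int) (x : Int) : Int × Bool × Int :=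
  if x = st.2.2 then st
  else if x > st.2.2 then (if st.2.1 then (st.1 + 1, false, x) else (st.1, false, x))
  else (st.1, true, x)

def is_true_canyon_alt (n : Int) (a : List Int) : Bool :=
  if n ≤ 0 then false
  else
    let st := (PySem.List.slice a (some 1) (some n)).foldl bstep (0, true, PySem.List.pyGetD a 0 0)
    let v := if st.2.1 then st.1 + 1 else st.1
    decide (v = 1)

-- ===== PRECONDITION & SPEC =====
-- Pre_ excludes exactly the inputs where A raises IndexError: n larger than len(a).
def Pre_is_true_canyon (n : Int) (a : List Int) : Prop := n ≤ (a.length : Int)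
instance (n : Int) (a : List Int) : Decidable (Pre_is_true_canyon n a) := by
  unfold Pre_is_true_canyon; infer_instance

def pvWitness_is_true_canyon : Int × List Int := (3, [2, 1, 1])

def Spec_is_true_canyon (n : Int) (a : List Int) (out : Bool) : Prop := out = is_true_canyon_alt n a
instance (n : Int) (a : List Int) (out : Bool) : Decidable (Spec_is_true_canyon n a out) := by
  unfold Spec_is_true_canyon; infer_instance

-- ===== CLAIM (what is proved, stated in full; the proofs are below) =====
def Claim_equal_is_true_canyon : Prop := ∀ (n : Int) (a : List Int), Dom_is_true_canyon n a → Pre_is_true_canyon n a → Spec_is_true_canyon n a (is_true_canyon n a)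

-- ===== LEMMAS AND PROOFS =====

-- reference count: valleys of the remaining list, given previous distinct value p and
-- flag d = "p is still a valley candidate (everything left of it is ≥, with a strict drop)"
def cnt : Int → Bool → List Int → Int
  | _, d, [] => if d then 1 else 0
  | p, d, x :: t =>
    if x = p then cnt p d t
    else if x > p then (if d then 1 else 0) + cnt x false t
    else cnt x true t

-- the index where A's inner loop stops, as a Nat recursion
def wend (a : List Int) (m : Nat) (cur : Int) (k : Nat) : Nat :=
  if h : k < m ∧ a.getD k 0 = cur then wend a m cur (k+1) else k
termination_by m - k
decreasing_by omega

theorem wend_ge (a : List Int) (m : Nat) (cur : Int) (k : Nat) : k ≤ wend a m cur k := by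
  fun_induction wend a m cur k with
  | case1 k h ih => omega
  | case2 k h => omega

theorem wend_le (a : List Int) (m : Nat) (cur : Int) (k : Nat) (hk : k ≤ m) :
    wend a m cur k ≤ m := by
  fun_induction wend a m cur k with
  | case1 k h ih => exact ih (by omega)
  | case2 k h => omega

theorem wend_mid (a : List Int) (m : Nat) (cur : Int) (k : Nat) :
    ∀ j, k ≤ j → j < wend a m cur k → a.getD j 0 = cur := by
  fun_induction wend a m cur k with
  | case1 k h ih =>
    intro j hj hj2
    rcases Nat.eq_or_lt_of_le hj with rfl | hlt
    · exact h.2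
    · exact ih j hlt hj2
  | case2 k h => intro j hj hj2; omega

theorem wend_stop (a : List Int) (m : Nat) (cur : Int) (k : Nat)
    (h : wend a m cur k < m) : a.getD (wend a m cur k) 0 ≠ cur := by
  fun_induction wend a m cur k with
  | case1 k h2 ih => exact ih h
  | case2 k h2 =>
    intro hc
    exact h2 ⟨h, hc⟩

theorem wend_advance (a : List Int) (m : Nat) (cur : Int) (k : Nat)
    (hk : k < m) (hc : a.getD k 0 = cur) : k + 1 ≤ wend a m cur k := by
  rw [wend]
  simp only [hk, hc, and_self, dite_true]
  exact wend_ge a m cur (k+1)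

theorem segInner_eq_wend (a : List Int) (m : Nat) (cur : Int) :
    ∀ (fuel : Nat) (k : Nat), m - k ≤ fuel →
      segInner a (m : Int) cur (k : Int) fuel = ((wend a m cur k : Nat) : Int) := by
  intro fuel
  induction fuel with
  | zero =>
    intro k hk
    have hkm : ¬ (k < m ∧ a.getD k 0 = cur) := by rintro ⟨h1, _⟩; omega
    simp only [segInner]
    rw [wend, dif_neg hkm]
  | succ f ih =>
    intro k hk
    rw [wend]
    by_cases h : k < m ∧ a.getD k 0 = cur
    · rw [dif_pos h]
      simp only [segInner, PySem.List.pyGetD_natCast]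
      have hcond : ((k : Int) < (m : Int) ∧ a.getD k 0 = cur) := ⟨by exact_mod_cast h.1, h.2⟩
      rw [if_pos hcond]
      have hc2 : ((k : Int) + 1) = ((k + 1 : Nat) : Int) := by push_cast; ring
      rw [hc2]
      exact ih (k+1) (by omega)
    · rw [dif_neg h]
      simp only [segInner, PySem.List.pyGetD_natCast]
      have hcond : ¬ ((k : Int) < (m : Int) ∧ a.getD k 0 = cur) := by
        rintro ⟨h1, h2⟩; exact h ⟨by exact_mod_cast h1, h2⟩
      rw [if_neg hcond]

theorem segOuter_nil (a : List Int) (n : Int) (i : Int) (fuel : Nat) (h : ¬ i < n) :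
    segOuter a n i fuel = [] := by
  cases fuel with
  | zero => rfl
  | succ f => simp [segOuter, h]

-- cnt skips elements equal to p
theorem cnt_skip (a : List Int) (m : Nat) (cur : Int) (d : Bool) :
    ∀ (q s W : Nat), W - s = q → s ≤ W → W ≤ m → m ≤ a.length →
      (∀ j, s ≤ j → j < W → a.getD j 0 = cur) →
      cnt cur d ((a.take m).drop s) = cnt cur d ((a.take m).drop W) := by
  intro q
  induction q with
  | zero =>
    intro s W hq h1 h2 h3 hall
    have : s = W := by omega
    rw [this]
  | succ q ihq =>
    intro s W hq h1 h2 h3 hall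
    have hsW : s < W := by omega
    have hs : s < m := by omega
    have hsl : s < a.length := by omega
    have hgd : a.getD s 0 = a[s] := by
      rw [List.getD_eq_getElem?_getD, List.getElem?_eq_getElem hsl]
      rfl
    have hdrop : (a.take m).drop s = a.getD s 0 :: (a.take m).drop (s+1) := by
      rw [List.drop_eq_getElem_cons (by rw [List.length_take]; omega)]
      congr 1
      rw [List.getElem_take, hgd]
    have hv : a.getD s 0 = cur := hall s (le_refl s) hsW
    rw [hdrop, hv]
    simp only [cnt]
    exact ihq (s+1) W (by omega) (by omega) h2 h3 (fun j _ hj2 => hall j (by omega) hj2)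

-- main loop correspondence
theorem outer_eq_cnt (a : List Int) (m : Nat) (hm : m ≤ a.length) :
    ∀ (fuel : Nat) (k : Nat), k < m → m - k ≤ fuel →
      (((segOuter a (m : Int) (k : Int) fuel).filter (fun s =>
          (decide (s.1 = 0) || decide (PySem.List.pyGetD a (s.1 - 1) 0 > s.2.2)) &&
          (decide (s.2.1 = (m : Int) - 1) || decide (PySem.List.pyGetD a (s.2.1 + 1) 0 > s.2.2)))).length : Int)
        = cnt (a.getD k 0) (decide (k = 0) || decide (a.getD (k-1) 0 > a.getD k 0))
            ((a.take m).drop (k+1)) := by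
  intro fuel
  induction fuel with
  | zero => intro k hk hf; omega
  | succ f ih =>
    intro k hk hf
    have hklt : (k : Int) < (m : Int) := by exact_mod_cast hk
    rw [segOuter, if_pos hklt]
    simp only [PySem.List.pyGetD_natCast]
    set cur := a.getD k 0 with hcur
    set W := wend a m cur k with hW
    have hWk : k + 1 ≤ W := wend_advance a m cur k hk rfl
    have hWm : W ≤ m := wend_le a m cur k (by omega)
    have hinner : segInner a (m : Int) cur (k : Int) (f+1) = ((W : Nat) : Int) := segInner_eq_wend a m cur (f+1) k hf
    simp only [hinner]
    set d := (decide (k = 0) || decide (a.getD (k-1) 0 > cur)) with hd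
    -- the head segment's filter test evaluates to d && rightcond
    have hleft : (decide ((k : Int) = 0) || decide (PySem.List.pyGetD a ((k : Int) - 1) 0 > cur)) = d := by
      rw [hd]
      by_cases hk0 : k = 0
      · subst hk0; simp
      · have : ¬ ((k : Int) = 0) := by exact_mod_cast hk0
        have hc : ((k : Int) - 1) = ((k - 1 : Nat) : Int) := by omega
        simp only [this, hk0, decide_false, Bool.false_or, hc, PySem.List.pyGetD_natCast]
    -- skip the constant run on the cnt side
    have hskip : cnt cur d ((a.take m).drop (k+1)) = cnt cur d ((a.take m).drop W) := by
      apply cnt_skip a m cur d (W - (k+1)) (k+1) W rfl (by omega) hWm hm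
      intro j hj hj2
      exact wend_mid a m cur k j (by omega) hj2
    rw [hskip]
    have haW' : W < m → a.getD W 0 ≠ cur := fun h => wend_stop a m cur k h
    have hprev : a.getD (W-1) 0 = cur := wend_mid a m cur k (W-1) (by omega) (by omega)
    clear_value W cur d
    by_cases hWem : W = m
    · -- last segment: right condition is true, rest of the list is empty
      subst hWem
      have hrest : segOuter a (W : Int) ((W : Nat) : Int) f = [] := segOuter_nil a _ _ f (by omega)
      rw [hrest]
      have hright : (decide (((W : Nat) : Int) - 1 = (W : Int) - 1) || decide (PySem.List.pyGetD a (((W : Nat) : Int) - 1 + 1) 0 > cur)) = true := by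
        simp
      have hdropW : (a.take W).drop W = ([] : List Int) := by
        apply List.drop_eq_nil_of_le
        rw [List.length_take]; omega
      rw [hdropW]
      simp only [List.filter, hleft, cnt]
      cases d <;> simp
    · -- another distinct value follows at index W
      have hWltm : W < m := by omega
      have hWl : W < a.length := by omega
      have haW : a.getD W 0 ≠ cur := haW' hWltm
      have hdropW : (a.take m).drop W = a.getD W 0 :: (a.take m).drop (W+1) := by
        rw [List.drop_eq_getElem_cons (by rw [List.length_take]; omega)]
        congr 1
        rw [List.getElem_take, List.getD_eq_getElem?_getD, List.getElem?_eq_getElem hWl]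
        rfl
      have hright : (decide (((W : Nat) : Int) - 1 = (m : Int) - 1) || decide (PySem.List.pyGetD a (((W : Nat) : Int) - 1 + 1) 0 > cur)) = decide (a.getD W 0 > cur) := by
        have h1 : ¬ (((W : Nat) : Int) - 1 = (m : Int) - 1) := by omega
        have h2 : (((W : Nat) : Int) - 1 + 1) = ((W : Nat) : Int) := by ring
        simp only [h1, decide_false, Bool.false_or, h2, PySem.List.pyGetD_natCast]
      have hih := ih W hWltm (by omega)
      have hdW : (decide (W = 0) || decide (a.getD (W-1) 0 > a.getD W 0)) = decide (cur > a.getD W 0) := by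
        have : ¬ (W = 0) := by omega
        simp only [this, decide_false, Bool.false_or, hprev]
      rw [hdW] at hih
      rw [hdropW]
      simp only [List.filter, hleft, hright]
      rcases lt_trichotomy (a.getD W 0) cur with hlt | heq | hgt
      · -- next value is smaller: head segment not a valley, flag becomes true
        have e1 : decide (a.getD W 0 > cur) = false := by
          simp only [decide_eq_false_iff_not, gt_iff_lt, not_lt]; omega
        have e2 : decide (cur > a.getD W 0) = true := by
          simp only [decide_eq_true_eq, gt_iff_lt]; omega
        have e3 : (a.getD W 0 = cur) = False := by
          simp only [eq_iff_iff, iff_false]; omega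
        have e4 : (a.getD W 0 > cur) = False := by
          simp only [eq_iff_iff, iff_false, gt_iff_lt, not_lt]; omega
        rw [e1] at *
        simp only [Bool.and_false, cnt, e3, if_false, e4]
        rw [e2] at hih
        exact hih
      · exact absurd heq haW
      · -- next value is larger: head segment is a valley iff d, flag becomes false
        have e1 : decide (a.getD W 0 > cur) = true := by
          simp only [decide_eq_true_eq, gt_iff_lt]; omega
        have e2 : decide (cur > a.getD W 0) = false := by
          simp only [decide_eq_false_iff_not, gt_iff_lt, not_lt]; omega
        have e3 : (a.getD W 0 = cur) = False := by
          simp only [eq_iff_iff, iff_false]; omega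
        have e4 : (a.getD W 0 > cur) = True := by
          simp only [eq_iff_iff, iff_true, gt_iff_lt]; omega
        rw [e1]
        rw [e2] at hih
        simp only [Bool.and_true, cnt, e3, if_false, e4, if_true]
        cases hdb : d
        · simp only [Bool.false_eq_true, if_false]
          rw [hih]; ring
        · simp only [if_true, List.length_cons]
          rw [← hih]; push_cast; ring

-- B's fold computes cnt
theorem bfold : ∀ (l : List Int) (v : Int) (d : Bool) (p : Int),
    (if (l.foldl bstep (v, d, p)).2.1 then (l.foldl bstep (v, d, p)).1 + 1 else (l.foldl bstep (v, d, p)).1)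
      = v + cnt p d l := by
  intro l
  induction l with
  | nil => intro v d p; cases d <;> simp [cnt]
  | cons x t ih =>
    intro v d p
    simp only [List.foldl_cons, bstep]
    by_cases h1 : x = p
    · simp only [if_pos h1, cnt, ih]
    · by_cases h2 : x > p
      · simp only [if_neg h1, if_pos h2, cnt]
        cases d
        · simp only [Bool.false_eq_true, if_false, ih]; ring
        · simp only [if_true, ih]; ring
      · simp only [if_neg h1, if_neg h2, cnt, ih]

theorem take_m_tail (a : List Int) (m : Nat) :
    (a.take m).drop 1 = (a.drop 1).take (m - 1) := by
  rw [List.drop_take]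

-- ===== VERDICT (by name: the statement is the Claim_ definition above) =====
theorem is_true_canyon_spec : Claim_equal_is_true_canyon := by
  unfold Claim_equal_is_true_canyon
  intro n a _ hpre
  unfold Pre_is_true_canyon at hpre
  unfold Spec_is_true_canyon is_true_canyon is_true_canyon_alt
  by_cases hn : n ≤ 0
  · have h0 : n.toNat = 0 := by omega
    rw [h0, if_pos hn]
    simp [segOuter]
  · rw [not_le] at hn
    rw [if_neg (by omega : ¬ n ≤ 0)]
    have hmn : ((n.toNat : Nat) : Int) = n := by omega
    have hml : n.toNat ≤ a.length := by omega
    have hm0 : 0 < n.toNat := by omega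
    -- A side
    have hA := outer_eq_cnt a n.toNat hml n.toNat 0 hm0 (by omega)
    rw [hmn] at hA
    simp only [Nat.cast_zero] at hA
    simp only [decide_true, Bool.true_or, zero_add] at hA
    -- B side
    have hslice : PySem.List.slice a (some 1) (some n) = (a.drop 1).take (n.toNat - 1) := by
      rw [PySem.List.slice_toNat a (by omega) (by omega)]
      norm_num
    have hB := bfold ((a.drop 1).take (n.toNat - 1)) 0 true (PySem.List.pyGetD a 0 0)
    rw [PySem.List.pyGetD_zero, zero_add] at hB
    simp only [PySem.List.pyGetD_zero, hslice]
    rw [hB]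
    rw [take_m_tail a n.toNat] at hA
    rw [decide_eq_decide, ← hA]
    omega
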